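-- pv_equiv track=rewrite | github.com/ATPs/alpha2rescore | src/alpha2rescore/alphapeptms2/_utils/peptidoform.py | _pick_one
-- ===== SOURCE A (Python) =====
-- from typing import Iterable, Sequence, Union
--
-- class ModMappingError(ValueError):
--     """Raised when a ProForma modification cannot be mapped to AlphaBase."""
--
-- def _pick_one(candidates: Sequence[str], preferred_suffixes: Sequence[str]) -> str:
--     unique_candidates = list(dict.fromkeys(candidates))
--     if not unique_candidates:
--         raise ModMappingError("Expected at least one AlphaBase modification candidate")
--     for suffix in preferred_suffixes:
--         preferred = [name for name in unique_candidates if name.endswith(suffix)]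
--         if len(preferred) == 1:
--             return preferred[0]
--     if len(unique_candidates) == 1:
--         return unique_candidates[0]
--     raise ModMappingError(
--         f"Ambiguous AlphaBase modification mapping candidates: {', '.join(unique_candidates)}"
--     )
-- ===== SOURCE B (Python) =====
-- class ModMappingError(ValueError):
--     """Raised when a ProForma modification cannot be mapped to AlphaBase."""
--
-- def _pick_one(candidates, preferred_suffixes):
--     unique_candidates = list(dict.fromkeys(candidates))
--     if not unique_candidates:
--         raise ModMappingError("Expected at least one AlphaBase modification candidate")
--     # Build an index suffix -> list of unique candidates ending with it, in one pass
--     # over the candidates (each candidate is bucketed under every suffix it ends with).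
--     suffixes = list(dict.fromkeys(preferred_suffixes))
--     matches = {s: [] for s in suffixes}
--     for name in unique_candidates:
--         for s in suffixes:
--             if name.endswith(s):
--                 matches[s].append(name)
--     for s in preferred_suffixes:
--         if len(matches[s]) == 1:
--             return matches[s][0]
--     if len(unique_candidates) == 1:
--         return unique_candidates[0]
--     raise ModMappingError(
--         f"Ambiguous AlphaBase modification mapping candidates: {', '.join(unique_candidates)}"
--     )
-- ===== Notes on version B (the rewrite author's own statement) =====
-- stated objective: alternative
-- what changed: Replaces A's per-suffix rescans of the candidate list by a suffix->matching-candidates index built in one pass over the unique candidates, then a lookup-only scan of the preferred suffixes.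
import Mathlib
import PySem

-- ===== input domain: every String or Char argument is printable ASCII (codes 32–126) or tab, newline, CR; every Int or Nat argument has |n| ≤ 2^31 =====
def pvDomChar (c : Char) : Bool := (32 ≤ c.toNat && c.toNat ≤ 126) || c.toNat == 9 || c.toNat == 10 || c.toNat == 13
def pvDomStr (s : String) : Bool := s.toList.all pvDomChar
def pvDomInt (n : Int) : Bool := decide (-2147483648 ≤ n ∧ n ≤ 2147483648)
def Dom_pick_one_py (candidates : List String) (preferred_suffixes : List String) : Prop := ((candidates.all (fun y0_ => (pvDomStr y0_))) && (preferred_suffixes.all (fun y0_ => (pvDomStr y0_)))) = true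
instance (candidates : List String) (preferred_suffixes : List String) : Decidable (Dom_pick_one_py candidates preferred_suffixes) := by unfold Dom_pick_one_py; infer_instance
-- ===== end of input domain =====

-- B replaces A's per-suffix rescans of the unique candidates by a suffix→matches index
-- built in one pass over the unique candidates, then a lookup-only scan of the suffixes
-- (objective: alternative decomposition, same cost).

-- ===== PORT A =====
-- the 'for suffix in preferred_suffixes' loop; 'none' = the loop fell through
def pickA_loop (unique : List String) : List String → Option String
  | [] => none
  | s :: rest =>
      let preferred := unique.filter (fun n => PySem.Str.endswith n s)
      if preferred.length = 1 then some (preferred.headD "")  -- preferred[0]; length = 1 so head exists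
      else pickA_loop unique rest

def pick_one_py (candidates : List String) (preferred_suffixes : List String) : String :=
  let unique := PySem.List.dedup candidates      -- list(dict.fromkeys(candidates))
  if unique = [] then ""                         -- raise ModMappingError: outside Pre_
  else
    match pickA_loop unique preferred_suffixes with
    | some r => r
    | none =>
        if unique.length = 1 then unique.headD ""
        else ""                                  -- raise ModMappingError: outside Pre_

-- ===== PORT B =====
-- matches = {s: [] for s in suffixes}; for name in unique: for s in suffixes: if name.endswith(s): matches[s].append(name)
def pickB_build (suffixes : List String) (unique : List String) : PySem.Dict String (List String) :=
  unique.foldl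
    (fun d name =>
      suffixes.foldl
        (fun d s => if PySem.Str.endswith name s then d.modify s [] (fun l => l ++ [name]) else d)
        d)
    (suffixes.foldl (fun d s => d.insert s []) PySem.Dict.empty)

-- the final 'for s in preferred_suffixes' lookup loop
def pickB_scan (mtch : PySem.Dict String (List String)) : List String → Option String
  | [] => none
  | s :: rest =>
      let m := mtch.getD s []
      if m.length = 1 then some (m.headD "")     -- matches[s][0]; length = 1 so head exists
      else pickB_scan mtch rest

def pick_one_py_alt (candidates : List String) (preferred_suffixes : List String) : String :=
  let unique := PySem.List.dedup candidates
  if unique = [] then ""                         -- raise ModMappingError: outside Pre_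
  else
    let mtch := pickB_build (PySem.List.dedup preferred_suffixes) unique
    match pickB_scan mtch preferred_suffixes with
    | some r => r
    | none =>
        if unique.length = 1 then unique.headD ""
        else ""                                  -- raise ModMappingError: outside Pre_

-- ===== PRECONDITION & SPEC =====
-- Pre_ excludes exactly the inputs on which Python A raises ModMappingError: empty
-- candidate list, or several unique candidates with no preferred suffix matching exactly one.
def Pre_pick_one_py (candidates : List String) (preferred_suffixes : List String) : Prop :=
  PySem.List.dedup candidates ≠ [] ∧
    ((∃ s ∈ preferred_suffixes,
        ((PySem.List.dedup candidates).filter (fun n => PySem.Str.endswith n s)).length = 1) ∨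
      (PySem.List.dedup candidates).length = 1)

instance (candidates : List String) (preferred_suffixes : List String) : Decidable (Pre_pick_one_py candidates preferred_suffixes) := by unfold Pre_pick_one_py; infer_instance

def pvWitness_pick_one_py : List String × List String := (["Oxidation@M", "Oxidation@P"], ["@M"])

def Spec_pick_one_py (candidates : List String) (preferred_suffixes : List String) (out : String) : Prop := out = pick_one_py_alt candidates preferred_suffixes
instance (candidates : List String) (preferred_suffixes : List String) (out : String) : Decidable (Spec_pick_one_py candidates preferred_suffixes out) := by unfold Spec_pick_one_py; infer_instance

-- ===== CLAIM (what is proved, stated in full; the proofs are below) =====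
def Claim_equal_pick_one_py : Prop := ∀ (candidates : List String) (preferred_suffixes : List String), Dom_pick_one_py candidates preferred_suffixes → Pre_pick_one_py candidates preferred_suffixes → Spec_pick_one_py candidates preferred_suffixes (pick_one_py candidates preferred_suffixes)

-- ===== LEMMAS AND PROOFS =====

-- one inner pass over nodup suffixes appends `name` to exactly the buckets whose suffix matches
theorem getD_inner (sufs : List String) (d : PySem.Dict String (List String))
    (name s : String) (hnd : sufs.Nodup) :
    (sufs.foldl
        (fun d s => if PySem.Str.endswith name s then d.modify s [] (fun l => l ++ [name]) else d)
        d).getD s []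
      = if s ∈ sufs ∧ PySem.Str.endswith name s then d.getD s [] ++ [name] else d.getD s [] := by
  induction sufs generalizing d with
  | nil => simp
  | cons s' rest ih =>
    have hnd' : rest.Nodup := hnd.of_cons
    simp only [List.foldl_cons]
    rw [ih _ hnd']
    by_cases he : PySem.Chars.endswith name.toList s.toList = true <;>
      by_cases he' : PySem.Chars.endswith name.toList s'.toList = true <;>
      by_cases hs : s = s'
    · subst hs
      have hns : s ∉ rest := (List.nodup_cons.mp hnd).1
      simp [he, hns, PySem.Dict.getD_modify_self]
    · by_cases hm : s ∈ rest <;>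
        simp [he, he', hs, hm, PySem.Dict.getD_modify]
    · subst hs; exact absurd he he'
    · by_cases hm : s ∈ rest <;> simp [he, he', hs, hm]
    · subst hs; exact absurd he' he
    · by_cases hm : s ∈ rest <;>
        simp [he, he', hs, hm, PySem.Dict.getD_modify]
    · subst hs
      have hns : s ∉ rest := (List.nodup_cons.mp hnd).1
      simp [he, hns]
    · by_cases hm : s ∈ rest <;> simp [he, he', hs, hm]

theorem getD_init (sufs : List String) (d : PySem.Dict String (List String)) (s : String)
    (hd : d.getD s [] = []) :
    (sufs.foldl (fun d s => d.insert s []) d).getD s [] = [] := by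
  induction sufs generalizing d with
  | nil => simpa using hd
  | cons s' rest ih =>
    simp only [List.foldl_cons]
    apply ih
    rw [PySem.Dict.getD_insert]
    split <;> simp [hd]

theorem getD_build_aux (sufs : List String) (unique : List String) (s : String)
    (hnd : sufs.Nodup) (hs : s ∈ sufs) (D : PySem.Dict String (List String)) :
    (unique.foldl
        (fun d name =>
          sufs.foldl
            (fun d s => if PySem.Str.endswith name s then d.modify s [] (fun l => l ++ [name]) else d)
            d)
        D).getD s []
      = D.getD s [] ++ unique.filter (fun n => PySem.Str.endswith n s) := by
  induction unique generalizing D with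
  | nil => simp
  | cons name rest ih =>
    simp only [List.foldl_cons, List.filter_cons]
    rw [ih, getD_inner sufs D name s hnd]
    by_cases he : PySem.Chars.endswith name.toList s.toList = true
    · simp [he, hs]
    · simp [he]

theorem getD_build (sufs : List String) (unique : List String) (s : String)
    (hnd : sufs.Nodup) (hs : s ∈ sufs) :
    (pickB_build sufs unique).getD s [] = unique.filter (fun n => PySem.Str.endswith n s) := by
  unfold pickB_build
  rw [getD_build_aux sufs unique s hnd hs, getD_init sufs PySem.Dict.empty s (by simp)]
  simp

theorem scan_eq (unique : List String) (mtch : PySem.Dict String (List String))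
    (ps : List String)
    (h : ∀ s ∈ ps, mtch.getD s [] = unique.filter (fun n => PySem.Str.endswith n s)) :
    pickA_loop unique ps = pickB_scan mtch ps := by
  induction ps with
  | nil => rfl
  | cons s rest ih =>
    simp only [pickA_loop, pickB_scan]
    rw [h s List.mem_cons_self]
    split
    · rfl
    · exact ih (fun s' hs' => h s' (List.mem_cons_of_mem _ hs'))

-- ===== VERDICT (by name: the statement is the Claim_ definition above) =====
theorem pick_one_py_spec : Claim_equal_pick_one_py := by
  intro cs ps _ _
  unfold Spec_pick_one_py pick_one_py pick_one_py_alt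
  have hscan : pickA_loop (PySem.List.dedup cs) ps
      = pickB_scan (pickB_build (PySem.List.dedup ps) (PySem.List.dedup cs)) ps := by
    apply scan_eq
    intro s hs
    exact getD_build (PySem.List.dedup ps) (PySem.List.dedup cs) s
      (PySem.List.nodup_dedup ps) ((PySem.List.mem_dedup _ _).mpr hs)
  simp only [hscan]
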